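-- pv_equiv track=rewrite | github.com/Shnavo/Python | Calculator/Calculator.py | number_checker
-- ===== SOURCE A (Python) =====
-- def number_checker(input):
--     numbers = [str(number) for number in range(10)]
--     for symbol in input:
--         if symbol in numbers or symbol == ".": # added here
--             continue
--         else:
--             return False
--     else:
--         return True
-- ===== SOURCE B (Python) =====
-- def number_checker(input):
--     # Count, for each allowed symbol, how often it occurs in the input;
--     # the input is valid iff these counts account for every character.
--     total = 0
--     for c in "0123456789.":
--         total += input.count(c)
--     return total == len(input)
-- ===== Notes on version B (the rewrite author's own statement) =====
-- stated objective: alternative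
-- what changed: Instead of scanning the input character by character with an early-exit membership test, B scans the fixed 11-symbol allowed alphabet, sums str.count of each symbol in the input, and compares the total against len(input) (counts of distinct symbols partition the valid characters).
import Mathlib
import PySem

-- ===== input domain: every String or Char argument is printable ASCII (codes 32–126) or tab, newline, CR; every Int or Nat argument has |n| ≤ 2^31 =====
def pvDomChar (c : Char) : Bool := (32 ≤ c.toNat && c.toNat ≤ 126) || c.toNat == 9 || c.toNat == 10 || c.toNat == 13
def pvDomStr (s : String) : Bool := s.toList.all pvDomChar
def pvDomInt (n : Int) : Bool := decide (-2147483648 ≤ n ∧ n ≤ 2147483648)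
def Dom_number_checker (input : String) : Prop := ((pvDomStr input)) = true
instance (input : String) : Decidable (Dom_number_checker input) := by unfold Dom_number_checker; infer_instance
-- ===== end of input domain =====

-- B replaces A's per-character early-exit membership loop by a loop over the fixed
-- allowed alphabet, summing per-symbol occurrence counts and comparing to the length.

-- ===== PORT A =====
-- numbers = [str(number) for number in range(10)]
def pvNumbersA : List String := (PySem.List.pyRange 0 10 1).map PySem.Int.toStr

-- the for/else loop: return False on the first bad symbol, else True
def pvLoopA (numbers : List String) : List Char → Bool
  | [] => true
  | c :: rest =>
    if numbers.contains (String.ofList [c]) || c == '.' then pvLoopA numbers rest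
    else false

def number_checker (input : String) : Bool :=
  pvLoopA pvNumbersA input.toList

-- ===== PORT B =====
-- total = 0; for c in "0123456789.": total += input.count(c); return total == len(input)
def number_checker_alt (input : String) : Bool :=
  let total := "0123456789.".toList.foldl
    (fun t c => t + PySem.Chars.count input.toList [c]) 0
  total == PySem.Chars.len input.toList

-- ===== PRECONDITION & SPEC =====
def Spec_number_checker (input : String) (out : Bool) : Prop := out = number_checker_alt input
instance (input : String) (out : Bool) : Decidable (Spec_number_checker input out) := by unfold Spec_number_checker; infer_instance

-- ===== CLAIM (what is proved, stated in full; the proofs are below) =====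
def Claim_equal_number_checker : Prop := ∀ (input : String), Dom_number_checker input → Spec_number_checker input (number_checker input)

-- ===== LEMMAS AND PROOFS =====

-- str.count of a single-character pattern is List.count of that character
lemma pvCountGo_single (c : Char) (l : List Char) :
    ∀ (fuel acc : Nat), l.length ≤ fuel →
      PySem.Chars.count.go [c] fuel l acc = acc + l.count c := by
  induction l with
  | nil => intro fuel acc _; cases fuel <;> simp [PySem.Chars.count.go]
  | cons x t ih =>
    intro fuel acc h
    cases fuel with
    | zero => simp at h
    | succ f =>
      by_cases hx : c = x
      · subst hx
        simp only [PySem.Chars.count.go, List.isPrefixOf, beq_self_eq_true,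
          Bool.true_and, if_true]
        show PySem.Chars.count.go [c] f t (acc + 1) = acc + (c :: t).count c
        rw [ih f (acc + 1) (by simp at h; omega)]
        simp [List.count_cons]
        omega
      · have hbe : (c == x) = false := by simp [hx]
        simp only [PySem.Chars.count.go, List.isPrefixOf, hbe, Bool.false_and,
          Bool.false_eq_true, if_false]
        rw [ih f acc (by simp at h; omega)]
        simp only [List.count_cons, beq_iff_eq, if_neg (fun e : x = c => hx e.symm), Nat.add_zero]

lemma pvCount_single (c : Char) (s : List Char) :
    PySem.Chars.count s [c] = s.count c := by
  simp [PySem.Chars.count, pvCountGo_single c s s.length 0 le_rfl]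

-- the accumulator fold is a sum of per-symbol counts
lemma pvFold_sum (s : List Char) (al : List Char) (a : Nat) :
    al.foldl (fun t c => t + PySem.Chars.count s [c]) a
      = a + (al.map (fun c => s.count c)).sum := by
  induction al generalizing a with
  | nil => simp
  | cons c rest ih =>
    rw [List.foldl_cons, ih (a + PySem.Chars.count s [c])]
    simp [pvCount_single]
    omega

-- summing indicator values over a duplicate-free alphabet is a membership indicator
lemma pvSum_indicator (x : Char) (al : List Char) (h : al.Nodup) :
    (al.map (fun c => if x = c then 1 else 0)).sum = (if x ∈ al then 1 else 0) := by
  induction al with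
  | nil => simp
  | cons c rest ih =>
    simp only [List.nodup_cons] at h
    by_cases hx : x = c
    · subst hx
      simp [h.1, ih h.2]
    · simp [hx, ih h.2]

-- per-symbol counts over the duplicate-free alphabet total the number of allowed characters
lemma pvSum_counts (al : List Char) (h : al.Nodup) (s : List Char) :
    (al.map (fun c => s.count c)).sum = s.countP (fun x => decide (x ∈ al)) := by
  induction s with
  | nil => simp [List.count_nil]
  | cons x t ih =>
    simp only [List.count_cons, List.countP_cons]
    rw [show (al.map fun c => t.count c + if x == c then 1 else 0)
          = (al.map fun c => t.count c + if x = c then 1 else 0) by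
        simp
      ]
    rw [List.sum_map_add (f := fun c => t.count c) (g := fun c => if x = c then 1 else 0)]
    rw [ih, pvSum_indicator x al h]
    by_cases hm : x ∈ al <;> simp [hm]

-- A's per-character test agrees with membership in the allowed alphabet
lemma pvCharTest (c : Char) :
    (pvNumbersA.contains (String.ofList [c]) || c == '.')
      = decide (c ∈ "0123456789.".toList) := by
  have hn : pvNumbersA = ["0","1","2","3","4","5","6","7","8","9"] := by decide
  rw [hn, Bool.eq_iff_iff]
  simp [String.ext_iff, String.toList_ofList]
  simp [or_assoc]

-- A's loop = "every char is allowed"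
lemma pvLoopA_eq_all (cs : List Char) :
    pvLoopA pvNumbersA cs = cs.all (fun c => decide (c ∈ "0123456789.".toList)) := by
  induction cs with
  | nil => rfl
  | cons c rest ih =>
    simp only [pvLoopA, List.all_cons, pvCharTest]
    by_cases h : (decide (c ∈ "0123456789.".toList)) = true <;> simp [ih]

-- ===== VERDICT (by name: the statement is the Claim_ definition above) =====
theorem number_checker_spec : Claim_equal_number_checker := by
  intro input _
  unfold Spec_number_checker number_checker number_checker_alt
  rw [pvLoopA_eq_all]
  rw [pvFold_sum, pvSum_counts _ (by decide)]
  simp only [Nat.zero_add, PySem.Chars.len]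
  rw [Bool.eq_iff_iff, beq_iff_eq, Nat.cast_inj, List.countP_eq_length, List.all_eq_true]
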